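-- pv_equiv track=rewrite | github.com/leedonggyu1848/baekjoon | 프로그래머스/4/67260. ［카카오 인턴］ 동굴 탐험/［카카오 인턴］ 동굴 탐험.py | solution
-- ===== SOURCE A (Python) =====
-- from collections import deque
--
-- NOT_VISITED = 0
--
-- VISITED = 1
--
-- HOLD = 2
--
-- def solution(n, path, order):
--     indgree = [0 for _ in range(n)]
--     edges = [[] for _ in range(n)]
--     orders = [[]for _ in range(n)]
--     visited = [NOT_VISITED for _ in range(n)]
--     q = deque()
--     for s, e in path:
--         edges[s].append(e)
--         edges[e].append(s)
--     for s, e in order: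
--         orders[s].append(e)
--         indgree[e] += 1
--
--     def append(tar):
--         q.appendleft(tar)
--         visited[tar] = VISITED
--         for nxt in orders[tar]:
--             indgree[nxt] -= 1
--             if indgree[nxt] == 0 and visited[nxt] == HOLD:
--                 append(nxt)
--
--     if indgree[0] == 0:
--         append(0)
--     while q:
--         cur = q.pop()
--         for nxt in edges[cur]:
--             if visited[nxt] != VISITED:
--                 if indgree[nxt] == 0:
--                     append(nxt)
--                 else:
--                     visited[nxt] = HOLD
--
--     for cur in range(n):
--         if visited[cur] != VISITED:
--             return False
--     return True
-- ===== SOURCE B (Python) =====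
-- def solution(n, path, order):
--     adj = [[] for _ in range(n)]
--     preds = [[] for _ in range(n)]
--     for s, e in path:
--         adj[s].append(e)
--         adj[e].append(s)
--     for s, e in order:
--         preds[e].append(s)
--     vis = [False] * n
--     changed = True
--     while changed:
--         changed = False
--         for v in range(n):
--             if not vis[v] and (v == 0 or any(vis[w] for w in adj[v])) and all(vis[u] for u in preds[v]):
--                 vis[v] = True
--                 changed = True
--     return all(vis)
-- ===== Notes on version B (the rewrite author's own statement) =====
-- stated objective: alternative
-- what changed: Replaces the three-state (NOT_VISITED/VISITED/HOLD) indegree bookkeeping, recursive cascade helper and deque worklist by a plain fixpoint saturation: repeatedly sweep all caves and open any unopened cave that is cave 0 or adjacent to an open cave and whose order-predecessors are all open, until a sweep changes nothing.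
import Mathlib
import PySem

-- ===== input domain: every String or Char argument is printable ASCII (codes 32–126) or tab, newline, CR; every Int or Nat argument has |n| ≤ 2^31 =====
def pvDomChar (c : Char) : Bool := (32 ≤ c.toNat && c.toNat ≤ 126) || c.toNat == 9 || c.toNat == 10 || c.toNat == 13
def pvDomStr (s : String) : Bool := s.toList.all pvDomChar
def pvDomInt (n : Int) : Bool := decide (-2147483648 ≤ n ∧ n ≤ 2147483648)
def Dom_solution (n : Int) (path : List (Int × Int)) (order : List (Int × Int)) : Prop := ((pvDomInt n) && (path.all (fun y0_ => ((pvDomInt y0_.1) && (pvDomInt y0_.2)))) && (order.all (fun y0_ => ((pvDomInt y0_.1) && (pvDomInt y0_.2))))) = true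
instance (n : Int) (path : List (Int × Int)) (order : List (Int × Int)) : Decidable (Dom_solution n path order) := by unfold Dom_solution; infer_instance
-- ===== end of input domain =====

-- B replaces A's three-state indegree/deque/recursive-cascade search by a fixpoint
-- saturation sweep; equality of the RETURN value is proved on Pre_ (A mutates no argument).

-- ===== PORT A =====
-- shared Python-list primitives: index access with Python's negative-index wrap
-- (exact for -len ≤ i < len, which Pre_ guarantees for every index either port uses)
def pvIdx (len : Nat) (i : Int) : Nat := (if i < 0 then i + len else i).toNat
def lgetI (xs : List Int) (i : Int) : Int := xs.getD (pvIdx xs.length i) 0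
def lsetI (xs : List Int) (i : Int) (v : Int) : List Int := xs.set (pvIdx xs.length i) v
def lgetL (xs : List (List Int)) (i : Int) : List Int := xs.getD (pvIdx xs.length i) []
def lappL (xs : List (List Int)) (i : Int) (v : Int) : List (List Int) := xs.set (pvIdx xs.length i) (lgetL xs i ++ [v])
def lgetB (xs : List Bool) (i : Int) : Bool := xs.getD (pvIdx xs.length i) false

-- edges[s].append(e); edges[e].append(s)  (identical line in both Pythons)
def buildAdj (n' : Nat) (ps : List (Int × Int)) : List (List Int) :=
  ps.foldl (fun es p => lappL (lappL es p.1 p.2) p.2 p.1) (List.replicate n' [])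

-- orders[s].append(e); indgree[e] += 1
def buildOrd (n' : Nat) (os : List (Int × Int)) : List (List Int) × List Int :=
  os.foldl (fun oi p => (lappL oi.1 p.1 p.2, lsetI oi.2 p.2 (lgetI oi.2 p.2 + 1)))
    (List.replicate n' [], List.replicate n' 0)

-- deque q in pop order (appendleft = append at the tail, q.pop() = take the head)
structure AState where
  q : List Int
  visited : List Int
  indgree : List Int

mutual
-- def append(tar): q.appendleft(tar); visited[tar] = VISITED; for nxt in orders[tar]: ...
-- (fuel only makes the recursion total; n+1 is proved never to run out under Pre_)
def appendA (orders : List (List Int)) : Nat → AState → Int → AState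
  | 0, st, _ => st
  | fuel+1, st, tar =>
    appendOrd orders fuel ⟨st.q ++ [tar], lsetI st.visited tar 1, st.indgree⟩ (lgetL orders tar)
termination_by f st t => (f, 0)

def appendOrd (orders : List (List Int)) : Nat → AState → List Int → AState
  | _, st, [] => st
  | fuel, st, nxt :: rest =>
    let ind := lsetI st.indgree nxt (lgetI st.indgree nxt - 1)
    let st1 : AState := ⟨st.q, st.visited, ind⟩
    let st2 := if lgetI ind nxt = 0 ∧ lgetI st.visited nxt = 2 then appendA orders fuel st1 nxt else st1
    appendOrd orders fuel st2 rest
termination_by f st l => (f, l.length + 1)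
end

-- for nxt in edges[cur]: if visited[nxt] != VISITED: if indgree[nxt] == 0: append(nxt) else: visited[nxt] = HOLD
def edgeLoopA (orders : List (List Int)) (F : Nat) : AState → List Int → AState
  | st, [] => st
  | st, nxt :: rest =>
    let st' := if lgetI st.visited nxt ≠ 1 then
                 (if lgetI st.indgree nxt = 0 then appendA orders F st nxt
                  else ⟨st.q, lsetI st.visited nxt 2, st.indgree⟩)
               else st
    edgeLoopA orders F st' rest

-- while q: cur = q.pop(); ...   (fuel n+2 is proved sufficient under Pre_)
def whileA (edges orders : List (List Int)) (F : Nat) : Nat → AState → AState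
  | 0, st => st
  | fuel+1, st =>
    match h : st.q with
    | [] => st
    | cur :: rest => whileA edges orders F fuel (edgeLoopA orders F ⟨rest, st.visited, st.indgree⟩ (lgetL edges cur))

def runA (n : Int) (path : List (Int × Int)) (order : List (Int × Int)) : AState :=
  let n' := n.toNat
  let edges := buildAdj n' path
  let oi := buildOrd n' order
  let F := n' + 1
  let st0 : AState := ⟨[], List.replicate n' 0, oi.2⟩
  let st1 := if lgetI oi.2 0 = 0 then appendA oi.1 F st0 0 else st0
  whileA edges oi.1 F (n' + 2) st1

-- for cur in range(n): if visited[cur] != VISITED: return False; return True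
def solution (n : Int) (path : List (Int × Int)) (order : List (Int × Int)) : Bool :=
  (List.range n.toNat).all (fun c => (runA n path order).visited.getD c 0 == 1)

-- ===== PORT B =====
-- for s, e in order: preds[e].append(s)
def buildPred (n' : Nat) (os : List (Int × Int)) : List (List Int) :=
  os.foldl (fun ps p => lappL ps p.2 p.1) (List.replicate n' [])

-- one sweep: for v in range(n): if not vis[v] and (v == 0 or any(...)) and all(...): vis[v] = True; changed = True
def passB (adj preds : List (List Int)) : List Bool × Bool → List Nat → List Bool × Bool
  | vb, [] => vb
  | (vis, ch), v :: rest =>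
    if vis.getD v false = false ∧
         (v = 0 ∨ (adj.getD v []).any (fun w => lgetB vis w)) ∧
         (preds.getD v []).all (fun u => lgetB vis u)
    then passB adj preds (vis.set v true, true) rest
    else passB adj preds (vis, ch) rest

-- while changed: changed = False; <sweep>   (fuel n+1 is proved sufficient: each kept round opens a cave)
def satB (adj preds : List (List Int)) : Nat → List Bool → List Bool
  | 0, vis => vis
  | fuel+1, vis =>
    let vb := passB adj preds (vis, false) (List.range adj.length)
    if vb.2 then satB adj preds fuel vb.1 else vb.1

def runB (n : Int) (path : List (Int × Int)) (order : List (Int × Int)) : List Bool :=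
  let n' := n.toNat
  let adj := buildAdj n' path
  let preds := buildPred n' order
  satB adj preds (n' + 1) (List.replicate n' false)

def solution_alt (n : Int) (path : List (Int × Int)) (order : List (Int × Int)) : Bool :=
  (runB n path order).all (fun b => b)

-- ===== PRECONDITION & SPEC =====
-- Pre_ is exactly where A returns: n ≥ 1 (A indexes indgree[0]) and every path/order
-- endpoint a valid Python index into the n lists, i.e. in [-n, n).
def Pre_solution (n : Int) (path : List (Int × Int)) (order : List (Int × Int)) : Prop :=
  1 ≤ n ∧ (∀ p ∈ path, -n ≤ p.1 ∧ p.1 < n ∧ -n ≤ p.2 ∧ p.2 < n) ∧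
    (∀ p ∈ order, -n ≤ p.1 ∧ p.1 < n ∧ -n ≤ p.2 ∧ p.2 < n)
instance (n : Int) (path : List (Int × Int)) (order : List (Int × Int)) : Decidable (Pre_solution n path order) := by unfold Pre_solution; infer_instance

def pvWitness_solution : Int × (List (Int × Int)) × (List (Int × Int)) := (3, [(0, 1), (1, 2)], [(2, 1)])

def Spec_solution (n : Int) (path : List (Int × Int)) (order : List (Int × Int)) (out : Bool) : Prop := out = solution_alt n path order
instance (n : Int) (path : List (Int × Int)) (order : List (Int × Int)) (out : Bool) : Decidable (Spec_solution n path order out) := by unfold Spec_solution; infer_instance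

-- ===== CLAIM (what is proved, stated in full; the proofs are below) =====
def Claim_equal_solution : Prop := ∀ (n : Int) (path : List (Int × Int)) (order : List (Int × Int)), Dom_solution n path order → Pre_solution n path order → Spec_solution n path order (solution n path order)

-- ===== LEMMAS AND PROOFS =====

-- ---- abstract set characterisation shared by both proofs ----
-- the cell (normalised index in [0,n)) a raw Python index denotes
-- VisS / VisB: the set of opened cells of a visited array
def VisS (vis : List Int) (c : Nat) : Prop := vis.getD c 0 = 1
def VisH (vis : List Int) (c : Nat) : Prop := vis.getD c 0 = 1 ∨ vis.getD c 0 = 2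
def VisB (vis : List Bool) (c : Nat) : Prop := vis.getD c false = true
def Nbr (n' : Nat) (pth : List (Int × Int)) (c d : Nat) : Prop :=
  ∃ p ∈ pth, (pvIdx n' p.1 = c ∧ pvIdx n' p.2 = d) ∨ (pvIdx n' p.2 = c ∧ pvIdx n' p.1 = d)
-- number of order-predecessors of cell c not yet opened (with multiplicity)
def PredCnt (n' : Nat) (ord : List (Int × Int)) (vis : List Int) (c : Nat) : Nat :=
  ord.countP (fun p => pvIdx n' p.2 == c && !(vis.getD (pvIdx n' p.1) 0 == 1))
-- c may be opened next, given the set S of already-open cells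
def FS (n' : Nat) (pth ord : List (Int × Int)) (S : Nat → Prop) (c : Nat) : Prop :=
  (c = 0 ∨ ∃ d, Nbr n' pth c d ∧ S d) ∧ (∀ p ∈ ord, pvIdx n' p.2 = c → S (pvIdx n' p.1))
def Justified (n' : Nat) (pth ord : List (Int × Int)) (l : List Nat) : Prop :=
  ∀ i, (h : i < l.length) → FS n' pth ord (fun d => d ∈ l.take i) l[i]
def GenSet (n' : Nat) (pth ord : List (Int × Int)) (S : Nat → Prop) : Prop :=
  ∃ l, l.Nodup ∧ (∀ c, S c ↔ c ∈ l) ∧ (∀ c ∈ l, c < n') ∧ Justified n' pth ord l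
def ClosedSet (n' : Nat) (pth ord : List (Int × Int)) (S : Nat → Prop) : Prop :=
  ∀ c, c < n' → FS n' pth ord S c → S c

theorem nbr_symm {n' : Nat} {pth : List (Int × Int)} {c d : Nat} (h : Nbr n' pth c d) :
    Nbr n' pth d c := by
  obtain ⟨p, hp, h⟩ := h
  exact ⟨p, hp, h.elim (fun h => Or.inr ⟨h.2, h.1⟩) (fun h => Or.inl ⟨h.2, h.1⟩)⟩

theorem fs_mono {n' : Nat} {pth ord : List (Int × Int)} {S1 S2 : Nat → Prop} {c : Nat}
    (hS : ∀ c, S1 c → S2 c) (h : FS n' pth ord S1 c) : FS n' pth ord S2 c := by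
  obtain ⟨h1, h2⟩ := h
  refine ⟨h1.elim Or.inl (fun ⟨d, hd, hsd⟩ => Or.inr ⟨d, hd, hS d hsd⟩), fun p hp hc => hS _ (h2 p hp hc)⟩

theorem gen_sub_closed {n' : Nat} {pth ord : List (Int × Int)} {S1 S2 : Nat → Prop}
    (h1 : GenSet n' pth ord S1) (h2 : ClosedSet n' pth ord S2) : ∀ c, S1 c → S2 c := by
  obtain ⟨l, _hnd, hiff, hbd, hj⟩ := h1
  have key : ∀ i, i ≤ l.length → ∀ c ∈ l.take i, S2 c := by
    intro i
    induction i with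
    | zero => simp
    | succ i ih =>
      intro hi c hc
      rw [List.take_add_one] at hc
      rcases List.mem_append.mp hc with hc | hc
      · exact ih (by omega) c hc
      · have hlt : i < l.length := by omega
        have hc' : c = l[i] := by
          simp [List.getElem?_eq_getElem hlt] at hc; exact hc
        subst hc'
        have hfs := hj i hlt
        have hfs2 : FS n' pth ord S2 l[i] :=
          fs_mono (fun d hd => ih (by omega) d hd) hfs
        exact h2 _ (hbd _ (List.getElem_mem hlt)) hfs2
  intro c hc
  have : c ∈ l.take l.length := by rw [List.take_length]; exact (hiff c).mp hc
  exact key l.length le_rfl c this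

theorem justified_snoc {n' : Nat} {pth ord : List (Int × Int)} {l : List Nat} {γ : Nat}
    (hj : Justified n' pth ord l) (hγ : FS n' pth ord (fun d => d ∈ l) γ) :
    Justified n' pth ord (l ++ [γ]) := by
  intro i hi
  simp only [List.length_append, List.length_cons, List.length_nil] at hi
  by_cases h : i < l.length
  · have ht : (l ++ [γ]).take i = l.take i := List.take_append_of_le_length (by omega)
    rw [ht, List.getElem_append_left h]
    exact hj i h
  · have hi' : i = l.length := by omega
    subst hi'
    have ht : (l ++ [γ]).take l.length = l := by
      rw [List.take_append_of_le_length le_rfl, List.take_length]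
    rw [ht, List.getElem_append_right le_rfl]
    simpa using hγ

-- ---- small list toolbox ----
theorem getD_set_self {α : Type} (xs : List α) (i : Nat) (v d : α) (h : i < xs.length) :
    (xs.set i v).getD i d = v := by
  rw [List.getD_eq_getElem?_getD, List.getElem?_set_self h]; rfl

theorem getD_set_ne {α : Type} (xs : List α) {i j : Nat} (v d : α) (h : i ≠ j) :
    (xs.set i v).getD j d = xs.getD j d := by
  rw [List.getD_eq_getElem?_getD, List.getElem?_set_ne h, ← List.getD_eq_getElem?_getD]

theorem countP_split {α : Type} (l : List α) (p q : α → Bool) :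
    l.countP p = l.countP (fun a => p a && q a) + l.countP (fun a => p a && !q a) := by
  induction l with
  | nil => rfl
  | cons a t ih =>
    simp only [List.countP_cons, ih]
    cases hp : p a <;> cases hq : q a <;> simp [hp, hq] <;> omega

theorem countP_flip {α : Type} [DecidableEq α] {l : List α} {p p' : α → Bool} {γ : α}
    (hnd : l.Nodup) (hγ : γ ∈ l) (hp : p γ = true) (hp' : p' γ = false)
    (hagree : ∀ b ∈ l, b ≠ γ → p b = p' b) : l.countP p' + 1 = l.countP p := by
  induction l with
  | nil => cases hγ
  | cons a t ih =>
    simp only [List.countP_cons]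
    rcases List.mem_cons.mp hγ with rfl | hmem
    · have : ∀ b ∈ t, p b = p' b := fun b hb =>
        hagree b (List.mem_cons_of_mem _ hb) (fun h => (List.nodup_cons.mp hnd).1 (h ▸ hb))
      rw [show List.countP p' t = List.countP p t from
        List.countP_congr (fun x hx => by rw [this x hx]), hp, hp']
      simp
    · have ha : a ≠ γ := fun h => (List.nodup_cons.mp hnd).1 (h ▸ hmem)
      rw [hagree a List.mem_cons_self ha]
      have h2 := ih (List.nodup_cons.mp hnd).2 hmem (fun b hb => hagree b (List.mem_cons_of_mem _ hb))
      cases p' a <;> simp <;> omega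

-- ---- build-phase characterisations ----
theorem length_lappL (xs : List (List Int)) (i : Int) (v : Int) :
    (lappL xs i v).length = xs.length := by simp [lappL]

theorem mem_lappL {xs : List (List Int)} {c : Nat} (i v : Int) (hc : c < xs.length) (x : Int) :
    x ∈ (lappL xs i v).getD c [] ↔
      x ∈ xs.getD c [] ∨ (pvIdx xs.length i = c ∧ x = v) := by
  unfold lappL lgetL
  by_cases h : pvIdx xs.length i = c
  · subst h
    rw [getD_set_self _ _ _ _ (by omega)]
    simp
  · rw [getD_set_ne _ _ _ h]
    simp [h]

theorem countP_lappL {xs : List (List Int)} {c : Nat} (i v : Int) (hc : c < xs.length)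
    (q : Int → Bool) :
    ((lappL xs i v).getD c []).countP q =
      (xs.getD c []).countP q + (if pvIdx xs.length i = c then (if q v then 1 else 0) else 0) := by
  unfold lappL lgetL
  by_cases h : pvIdx xs.length i = c
  · subst h
    rw [getD_set_self _ _ _ _ (by omega)]
    simp [List.countP_append, List.countP_cons]
  · rw [getD_set_ne _ _ _ h]
    simp [h]

-- the adjacency fold: length, element range and membership characterisation
theorem adjFold_len (ps : List (Int × Int)) (acc : List (List Int)) :
    (ps.foldl (fun es p => lappL (lappL es p.1 p.2) p.2 p.1) acc).length = acc.length := by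
  induction ps generalizing acc with
  | nil => rfl
  | cons p t ih => rw [List.foldl_cons, ih]; simp [length_lappL]

theorem adjFold_mem (ps : List (Int × Int)) (acc : List (List Int)) {c : Nat}
    (hc : c < acc.length) (x : Int) :
    (x ∈ (ps.foldl (fun es p => lappL (lappL es p.1 p.2) p.2 p.1) acc).getD c [] ↔
      x ∈ acc.getD c [] ∨ ∃ p ∈ ps,
        (pvIdx acc.length p.1 = c ∧ x = p.2) ∨ (pvIdx acc.length p.2 = c ∧ x = p.1)) := by
  induction ps generalizing acc with
  | nil => simp
  | cons p t ih =>
    rw [List.foldl_cons]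
    have hl1 : (lappL acc p.1 p.2).length = acc.length := length_lappL ..
    have hl2 : (lappL (lappL acc p.1 p.2) p.2 p.1).length = acc.length := by
      rw [length_lappL, length_lappL]
    rw [ih (lappL (lappL acc p.1 p.2) p.2 p.1) (by rw [hl2]; omega)]
    rw [hl2]
    have h2 := mem_lappL (xs := lappL acc p.1 p.2) (c := c) p.2 p.1 (by rw [hl1]; omega) x
    rw [hl1] at h2
    rw [h2, mem_lappL p.1 p.2 hc x]
    simp only [List.mem_cons]
    constructor
    · rintro (((h | h) | h) | ⟨q, hq, h⟩)
      · exact Or.inl h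
      · exact Or.inr ⟨p, Or.inl rfl, Or.inl h⟩
      · exact Or.inr ⟨p, Or.inl rfl, Or.inr h⟩
      · exact Or.inr ⟨q, Or.inr hq, h⟩
    · rintro (h | ⟨q, (rfl | hq), h⟩)
      · exact Or.inl (Or.inl (Or.inl h))
      · exact h.elim (fun h => Or.inl (Or.inl (Or.inr h))) (fun h => Or.inl (Or.inr h))
      · exact Or.inr ⟨q, hq, h⟩

-- the single-append fold (A's orders list and B's preds list)
theorem appFold_len (k v : Int × Int → Int) (os : List (Int × Int)) (acc : List (List Int)) :
    (os.foldl (fun es p => lappL es (k p) (v p)) acc).length = acc.length := by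
  induction os generalizing acc with
  | nil => rfl
  | cons p t ih => rw [List.foldl_cons, ih, length_lappL]

theorem appFold_mem (k v : Int × Int → Int) (os : List (Int × Int)) (acc : List (List Int))
    {c : Nat} (hc : c < acc.length) (x : Int) :
    (x ∈ (os.foldl (fun es p => lappL es (k p) (v p)) acc).getD c [] ↔
      x ∈ acc.getD c [] ∨ ∃ p ∈ os, pvIdx acc.length (k p) = c ∧ x = v p) := by
  induction os generalizing acc with
  | nil => simp
  | cons p t ih =>
    rw [List.foldl_cons, ih (lappL acc (k p) (v p)) (by rw [length_lappL]; omega), length_lappL,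
      mem_lappL (k p) (v p) hc x]
    simp only [List.mem_cons]
    constructor
    · rintro ((h | h) | ⟨q, hq, h⟩)
      · exact Or.inl h
      · exact Or.inr ⟨p, Or.inl rfl, h⟩
      · exact Or.inr ⟨q, Or.inr hq, h⟩
    · rintro (h | ⟨q, (rfl | hq), h⟩)
      · exact Or.inl (Or.inl h)
      · exact Or.inl (Or.inr h)
      · exact Or.inr ⟨q, hq, h⟩

theorem appFold_countP (k v : Int × Int → Int) (os : List (Int × Int)) (acc : List (List Int))
    {c : Nat} (hc : c < acc.length) (q : Int → Bool) :
    ((os.foldl (fun es p => lappL es (k p) (v p)) acc).getD c []).countP q =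
      (acc.getD c []).countP q +
        os.countP (fun p => pvIdx acc.length (k p) == c && q (v p)) := by
  induction os generalizing acc with
  | nil => simp
  | cons p t ih =>
    rw [List.foldl_cons, ih (lappL acc (k p) (v p)) (by rw [length_lappL]; omega), length_lappL,
      countP_lappL (k p) (v p) hc q, List.countP_cons]
    by_cases h : pvIdx acc.length (k p) = c <;> cases hq : q (v p) <;> simp [h, hq] <;> omega

-- the indegree fold
theorem igFold_len (os : List (Int × Int)) (acc : List Int) :
    (os.foldl (fun ig p => lsetI ig p.2 (lgetI ig p.2 + 1)) acc).length = acc.length := by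
  induction os generalizing acc with
  | nil => rfl
  | cons p t ih => rw [List.foldl_cons, ih]; simp [lsetI]

theorem igFold_getD (os : List (Int × Int)) (acc : List Int) {c : Nat} (hc : c < acc.length) :
    (os.foldl (fun ig p => lsetI ig p.2 (lgetI ig p.2 + 1)) acc).getD c 0 =
      acc.getD c 0 + (os.countP (fun p => pvIdx acc.length p.2 == c) : Int) := by
  induction os generalizing acc with
  | nil => simp
  | cons p t ih =>
    rw [List.foldl_cons, ih (lsetI acc p.2 (lgetI acc p.2 + 1)) (by simpa [lsetI] using hc), List.countP_cons]
    have hlen : (lsetI acc p.2 (lgetI acc p.2 + 1)).length = acc.length := by simp [lsetI]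
    rw [hlen]
    unfold lsetI lgetI
    by_cases h : pvIdx acc.length p.2 = c
    · rw [h, getD_set_self _ _ _ _ (by omega)]
      simp
      push_cast
      ring
    · rw [getD_set_ne _ _ _ h]
      simp [h]

-- the two components of buildOrd
theorem buildOrd_fst (n' : Nat) (os : List (Int × Int)) :
    (buildOrd n' os).1 = os.foldl (fun es p => lappL es p.1 p.2) (List.replicate n' []) ∧
    (buildOrd n' os).2 = os.foldl (fun ig p => lsetI ig p.2 (lgetI ig p.2 + 1)) (List.replicate n' 0) := by
  unfold buildOrd
  suffices h : ∀ (a : List (List Int)) (b : List Int),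
      (os.foldl (fun oi p => (lappL oi.1 p.1 p.2, lsetI oi.2 p.2 (lgetI oi.2 p.2 + 1))) (a, b)) =
        (os.foldl (fun es p => lappL es p.1 p.2) a, os.foldl (fun ig p => lsetI ig p.2 (lgetI ig p.2 + 1)) b) by
    rw [h]; exact ⟨rfl, rfl⟩
  induction os with
  | nil => intro a b; rfl
  | cons p t ih => intro a b; rw [List.foldl_cons, List.foldl_cons, List.foldl_cons, ih]

-- ---- A-side invariants ----
structure InvC (n' : Nat) (pth ord : List (Int × Int)) (st : AState) (P : List Nat) : Prop where
  lenV : st.visited.length = n'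
  lenI : st.indgree.length = n'
  ideg : ∀ c, c < n' → st.indgree.getD c 0 = (PredCnt n' ord st.visited c : Int) + (P.count c : Int)
  holdJ : ∀ c, c < n' → st.visited.getD c 0 = 2 → ∃ d, Nbr n' pth c d ∧ VisS st.visited d
  qok : ∀ v ∈ st.q, pvIdx n' v < n' ∧ VisS st.visited (pvIdx n' v)
  gen : GenSet n' pth ord (VisS st.visited)

def HoldA (n' : Nat) (st : AState) : Prop :=
  ∀ c, c < n' → st.visited.getD c 0 = 2 → st.indgree.getD c 0 ≠ 0
def HoldE (n' : Nat) (st : AState) (γ : Nat) : Prop :=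
  ∀ c, c < n' → c ≠ γ → st.visited.getD c 0 = 2 → st.indgree.getD c 0 ≠ 0

def ucA (n' : Nat) (vis : List Int) : Nat := (List.range n').countP (fun c => !(vis.getD c 0 == 1))

def MonoA (n' : Nat) (st st' : AState) : Prop :=
  (∃ t, st'.q = st.q ++ t) ∧ (∀ c, VisS st.visited c → VisS st'.visited c) ∧
  (∀ c, VisH st.visited c → VisH st'.visited c) ∧
  (∀ c, ¬ VisS st.visited c → VisS st'.visited c → ∃ v ∈ st'.q, pvIdx n' v = c)

theorem monoA_rfl (n' : Nat) (st : AState) : MonoA n' st st :=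
  ⟨⟨[], by simp⟩, fun _ h => h, fun _ h => h, fun c h h' => absurd h' h⟩

theorem monoA_trans {n' : Nat} {s1 s2 s3 : AState} (h12 : MonoA n' s1 s2) (h23 : MonoA n' s2 s3) :
    MonoA n' s1 s3 := by
  obtain ⟨⟨t1, hq1⟩, hv1, hh1, hn1⟩ := h12
  obtain ⟨⟨t2, hq2⟩, hv2, hh2, hn2⟩ := h23
  refine ⟨⟨t1 ++ t2, by rw [hq2, hq1, List.append_assoc]⟩, fun c h => hv2 c (hv1 c h),
    fun c h => hh2 c (hh1 c h), fun c h h' => ?_⟩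
  by_cases h2 : VisS s2.visited c
  · obtain ⟨v, hv, he⟩ := hn1 c h h2
    exact ⟨v, by rw [hq2]; exact List.mem_append_left _ hv, he⟩
  · exact hn2 c h2 h'

def OrdOK (n' : Nat) (ord : List (Int × Int)) (orders : List (List Int)) : Prop :=
  orders.length = n' ∧
  (∀ c, c < n' → ∀ t, ((orders.getD c []).countP (fun x => pvIdx n' x == t)) =
      ord.countP (fun p => pvIdx n' p.1 == c && pvIdx n' p.2 == t)) ∧
  (∀ c, c < n' → ∀ x ∈ orders.getD c [], pvIdx n' x < n')

theorem ucA_le (n' : Nat) (vis : List Int) : ucA n' vis ≤ n' := by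
  have := List.countP_le_length (p := fun c => !(vis.getD c 0 == 1)) (l := List.range n')
  simpa [ucA] using this

-- marking cell γ VISITED and queueing tar: the first half of A's append
theorem mark_step {n' : Nat} {pth ord : List (Int × Int)} {orders : List (List Int)}
    (hOrd : OrdOK n' ord orders) {st : AState} {P : List Nat} {tar : Int}
    (hInv : InvC n' pth ord st P) (hγ : pvIdx n' tar < n')
    (hnv : ¬ VisS st.visited (pvIdx n' tar))
    (hleft : pvIdx n' tar = 0 ∨ ∃ d, Nbr n' pth (pvIdx n' tar) d ∧ VisS st.visited d)
    (hpc : PredCnt n' ord st.visited (pvIdx n' tar) = 0) :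
    InvC n' pth ord ⟨st.q ++ [tar], lsetI st.visited tar 1, st.indgree⟩
        (P ++ (orders.getD (pvIdx n' tar) []).map (fun x => pvIdx n' x)) ∧
      MonoA n' st ⟨st.q ++ [tar], lsetI st.visited tar 1, st.indgree⟩ ∧
      VisS (lsetI st.visited tar 1) (pvIdx n' tar) ∧
      ucA n' (lsetI st.visited tar 1) + 1 = ucA n' st.visited ∧
      (∀ c, (lsetI st.visited tar 1).getD c 0 =
        if c = pvIdx n' tar then 1 else st.visited.getD c 0) := by
  set γ := pvIdx n' tar with hγdef
  have e1 : lsetI st.visited tar 1 = st.visited.set γ 1 := by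
    unfold lsetI; rw [hInv.lenV]
  have hγlen : γ < st.visited.length := by rw [hInv.lenV]; exact hγ
  have f2 : ∀ c, (st.visited.set γ 1).getD c 0 = if c = γ then 1 else st.visited.getD c 0 := by
    intro c
    by_cases h : c = γ
    · subst h; rw [getD_set_self _ _ _ _ hγlen]; simp
    · rw [getD_set_ne _ _ _ (fun hh => h hh.symm)]; simp [h]
  have fVisS : ∀ c, VisS (st.visited.set γ 1) c ↔ (c = γ ∨ VisS st.visited c) := by
    intro c
    unfold VisS
    rw [f2]
    by_cases h : c = γ <;> simp [h]
  have fVisH : ∀ c, VisH (st.visited.set γ 1) c ↔ (c = γ ∨ VisH st.visited c) := by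
    intro c
    unfold VisH
    rw [f2]
    by_cases h : c = γ <;> simp [h]
  have hnvB : (st.visited.getD γ 0 == 1) = false := by
    simpa [VisS] using hnv
  have fPred : ∀ c, (PredCnt n' ord st.visited c : Int) =
      (PredCnt n' ord (st.visited.set γ 1) c : Int) +
        (ord.countP (fun p => pvIdx n' p.1 == γ && pvIdx n' p.2 == c) : Int) := by
    intro c
    unfold PredCnt
    rw [countP_split ord _ (fun p => pvIdx n' p.1 == γ)]
    have e2 : List.countP (fun p => (pvIdx n' p.2 == c && !(st.visited.getD (pvIdx n' p.1) 0 == 1)) && (pvIdx n' p.1 == γ)) ord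
        = List.countP (fun p => pvIdx n' p.1 == γ && pvIdx n' p.2 == c) ord := by
      apply List.countP_congr
      intro p _
      by_cases h1 : pvIdx n' p.1 = γ
      · have hg : (pvIdx n' p.1 == γ) = true := by simp [h1]
        have hv : (st.visited.getD (pvIdx n' p.1) 0 == 1) = false := by rw [h1]; exact hnvB
        rw [hg, hv]
        simp
      · have hg : (pvIdx n' p.1 == γ) = false := by simp [h1]
        rw [hg]
        simp
    have e3 : List.countP (fun p => (pvIdx n' p.2 == c && !(st.visited.getD (pvIdx n' p.1) 0 == 1)) && !(pvIdx n' p.1 == γ)) ord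
        = List.countP (fun p => pvIdx n' p.2 == c && !((st.visited.set γ 1).getD (pvIdx n' p.1) 0 == 1)) ord := by
      apply List.countP_congr
      intro p _
      rw [f2 (pvIdx n' p.1)]
      by_cases h1 : pvIdx n' p.1 = γ
      · simp [h1]
      · simp [h1]
    rw [e2, e3]
    push_cast
    ring
  have fCnt : ∀ c, (P ++ (orders.getD γ []).map (fun x => pvIdx n' x)).count c =
      P.count c + ord.countP (fun p => pvIdx n' p.1 == γ && pvIdx n' p.2 == c) := by
    intro c
    rw [List.count_append]
    congr 1
    rw [List.count_eq_countP, List.countP_map]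
    have := (hOrd.2.1 γ hγ c)
    simpa [Function.comp] using this
  refine ⟨⟨?_, ?_, ?_, ?_, ?_, ?_⟩, ?_, ?_, ?_, ?_⟩
  · simp [e1, hInv.lenV]
  · exact hInv.lenI
  · intro c hc
    simp only [e1]
    rw [hInv.ideg c hc, fPred c, fCnt c]
    push_cast
    ring
  · intro c hc hc2
    simp only [e1] at hc2 ⊢
    rw [f2] at hc2
    by_cases h : c = γ
    · simp [h] at hc2
    · simp [h] at hc2
      obtain ⟨d, hd, hvd⟩ := hInv.holdJ c hc hc2
      exact ⟨d, hd, (fVisS d).mpr (Or.inr hvd)⟩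
  · intro v hv
    simp only [e1]
    simp only [List.mem_append, List.mem_singleton] at hv
    rcases hv with hv | rfl
    · obtain ⟨h1, h2⟩ := hInv.qok v hv
      exact ⟨h1, (fVisS _).mpr (Or.inr h2)⟩
    · exact ⟨hγ, (fVisS _).mpr (Or.inl rfl)⟩
  · obtain ⟨l, hnd, hiff, hbd, hj⟩ := hInv.gen
    have hγl : γ ∉ l := fun h => hnv ((hiff γ).mpr h)
    refine ⟨l ++ [γ], ?_, ?_, ?_, ?_⟩
    · rw [List.nodup_append]
      refine ⟨hnd, List.nodup_singleton _, ?_⟩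
      intro a ha b hb
      rw [List.mem_singleton.mp hb]
      exact fun h => hγl (h ▸ ha)
    · intro c
      simp only [e1]
      rw [fVisS c]
      simp [hiff c]
      tauto
    · intro c hc
      simp only [List.mem_append, List.mem_singleton] at hc
      rcases hc with hc | rfl
      · exact hbd c hc
      · exact hγ
    · apply justified_snoc hj
      constructor
      · rcases hleft with h | ⟨d, hd, hvd⟩
        · exact Or.inl h
        · exact Or.inr ⟨d, hd, (hiff d).mp hvd⟩
      · intro p hp hpc2
        have h0 := List.countP_eq_zero.mp hpc p hp
        simp only [hpc2] at h0
        simp at h0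
        exact (hiff _).mp h0
  · refine ⟨⟨[tar], rfl⟩, ?_, ?_, ?_⟩
    · intro c h; simp only [e1]; exact (fVisS c).mpr (Or.inr h)
    · intro c h; simp only [e1]; exact (fVisH c).mpr (Or.inr h)
    · intro c h h'
      simp only [e1] at h'
      rcases (fVisS c).mp h' with rfl | h2
      · exact ⟨tar, by simp, rfl⟩
      · exact absurd h2 h
  · simp only [e1]; exact (fVisS γ).mpr (Or.inl rfl)
  · simp only [e1]
    unfold ucA
    apply countP_flip (List.nodup_range) (List.mem_range.mpr hγ)
    · show (!(st.visited.getD γ 0 == 1)) = true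
      rw [hnvB]
      rfl
    · show (!((st.visited.set γ 1).getD γ 0 == 1)) = false
      rw [f2 γ]
      simp
    · intro b _ hb
      show (!(st.visited.getD b 0 == 1)) = (!((st.visited.set γ 1).getD b 0 == 1))
      rw [f2 b]
      simp [hb]
  · intro c
    rw [e1]
    exact f2 c

theorem lgetI_norm {n' : Nat} {xs : List Int} (h : xs.length = n') (i : Int) :
    lgetI xs i = xs.getD (pvIdx n' i) 0 := by unfold lgetI; rw [h]

theorem length_lsetI (xs : List Int) (i v : Int) : (lsetI xs i v).length = xs.length := by
  simp [lsetI]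

theorem ucA_pos {n' : Nat} {vis : List Int} {c : Nat} (hc : c < n') (h : ¬ VisS vis c) :
    0 < ucA n' vis := by
  unfold ucA
  rw [List.countP_pos_iff]
  exact ⟨c, List.mem_range.mpr hc, by simpa [VisS] using h⟩

-- decrementing indgree[nxt]: the per-element step of A's order loop
theorem dec_step {n' : Nat} {pth ord : List (Int × Int)} {st : AState} {P Q : List Nat}
    {nxt : Int} (hδ : pvIdx n' nxt < n')
    (hInv : InvC n' pth ord st (P ++ pvIdx n' nxt :: Q)) :
    InvC n' pth ord ⟨st.q, st.visited, lsetI st.indgree nxt (lgetI st.indgree nxt - 1)⟩ (P ++ Q) ∧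
    (lsetI st.indgree nxt (lgetI st.indgree nxt - 1)).getD (pvIdx n' nxt) 0 =
      st.indgree.getD (pvIdx n' nxt) 0 - 1 ∧
    (∀ c, c ≠ pvIdx n' nxt →
      (lsetI st.indgree nxt (lgetI st.indgree nxt - 1)).getD c 0 = st.indgree.getD c 0) := by
  set δ := pvIdx n' nxt with hδdef
  have e1 : lsetI st.indgree nxt (lgetI st.indgree nxt - 1) =
      st.indgree.set δ (st.indgree.getD δ 0 - 1) := by
    unfold lsetI lgetI; rw [hInv.lenI]
  have hδlen : δ < st.indgree.length := by rw [hInv.lenI]; exact hδ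
  have f2 : ∀ c, (st.indgree.set δ (st.indgree.getD δ 0 - 1)).getD c 0 =
      if c = δ then st.indgree.getD δ 0 - 1 else st.indgree.getD c 0 := by
    intro c
    by_cases h : c = δ
    · subst h; rw [getD_set_self _ _ _ _ hδlen]; simp
    · rw [getD_set_ne _ _ _ (fun hh => h hh.symm)]; simp [h]
  refine ⟨⟨by simp [e1, hInv.lenV], by simp [e1, hInv.lenI], ?_, hInv.holdJ, hInv.qok, hInv.gen⟩,
    by rw [e1, f2 δ]; simp, by intro c hc; rw [e1, f2 c, if_neg hc]⟩
  intro c hc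
  simp only [e1]
  rw [f2 c]
  have hic := hInv.ideg c hc
  have hcount : (P ++ δ :: Q).count c = (P ++ Q).count c + (if c = δ then 1 else 0) := by
    rw [List.count_append, List.count_append, List.count_cons]
    by_cases h : c = δ
    · simp [h]
      omega
    · simp [h]
      omega
  rw [hcount] at hic
  by_cases h : c = δ
  · subst h
    rw [if_pos rfl, hic]
    simp
    push_cast
    ring
  · rw [if_neg h, hic, if_neg h]
    simp

-- MonoA for a state change that leaves q and visited untouched
theorem monoA_same {n' : Nat} {st st' : AState} (hq : st'.q = st.q)
    (hv : st'.visited = st.visited) : MonoA n' st st' := by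
  refine ⟨⟨[], by simp [hq]⟩, ?_, ?_, ?_⟩ <;> intro c <;> rw [hv] <;> intro h
  · exact h
  · exact h
  · exact fun h' => absurd h' h

-- the mutual fuel induction: A's append helper preserves the invariants, opens the
-- target cell, keeps |q| + #unopened constant and never exhausts its fuel
theorem append_main (n' : Nat) (pth ord : List (Int × Int)) (orders : List (List Int))
    (hOrd : OrdOK n' ord orders) : ∀ f : Nat,
    (∀ st P tar, InvC n' pth ord st P → HoldE n' st (pvIdx n' tar) →
      ucA n' st.visited ≤ f → pvIdx n' tar < n' → ¬ VisS st.visited (pvIdx n' tar) →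
      (pvIdx n' tar = 0 ∨ ∃ d, Nbr n' pth (pvIdx n' tar) d ∧ VisS st.visited d) →
      PredCnt n' ord st.visited (pvIdx n' tar) = 0 →
      InvC n' pth ord (appendA orders f st tar) P ∧ HoldA n' (appendA orders f st tar) ∧
        MonoA n' st (appendA orders f st tar) ∧
        VisS (appendA orders f st tar).visited (pvIdx n' tar) ∧
        (appendA orders f st tar).q.length + ucA n' (appendA orders f st tar).visited =
          st.q.length + ucA n' st.visited ∧
        ucA n' (appendA orders f st tar).visited < ucA n' st.visited) ∧
    (∀ l st P, InvC n' pth ord st (P ++ l.map (fun x => pvIdx n' x)) → HoldA n' st →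
      ucA n' st.visited ≤ f → (∀ x ∈ l, pvIdx n' x < n') →
      InvC n' pth ord (appendOrd orders f st l) P ∧ HoldA n' (appendOrd orders f st l) ∧
        MonoA n' st (appendOrd orders f st l) ∧
        (appendOrd orders f st l).q.length + ucA n' (appendOrd orders f st l).visited =
          st.q.length + ucA n' st.visited ∧
        ucA n' (appendOrd orders f st l).visited ≤ ucA n' st.visited) := by
  intro f
  induction f with
  | zero =>
    constructor
    · intro st P tar _ _ hf hγ hnv _ _
      exact absurd (ucA_pos hγ hnv) (by omega)
    · intro l
      induction l with
      | nil =>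
        intro st P hInv hHold _ _
        have heq : appendOrd orders 0 st [] = st := by rw [appendOrd]
        rw [heq]
        exact ⟨by simpa using hInv, hHold, monoA_rfl n' st, rfl, le_rfl⟩
      | cons nxt rest ihl =>
        intro st P hInv hHold hf hrng
        have hδ : pvIdx n' nxt < n' := hrng nxt List.mem_cons_self
        have hInv' : InvC n' pth ord st (P ++ pvIdx n' nxt :: rest.map (fun x => pvIdx n' x)) := by
          simpa using hInv
        obtain ⟨hInv1, hd1, hd2⟩ := dec_step hδ hInv'
        have hall : ∀ c, c < n' → VisS st.visited c := by
          intro c hc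
          by_contra hb
          exact absurd (ucA_pos hc hb) (by omega)
        have hguard : ¬ (lgetI (lsetI st.indgree nxt (lgetI st.indgree nxt - 1)) nxt = 0 ∧
            lgetI st.visited nxt = 2) := by
          rintro ⟨_, h2⟩
          have : st.visited.getD (pvIdx n' nxt) 0 = 2 := by
            rwa [lgetI_norm hInv.lenV] at h2
          have := hall _ hδ
          unfold VisS at this
          omega
        have heq : appendOrd orders 0 st (nxt :: rest) =
            appendOrd orders 0 ⟨st.q, st.visited, lsetI st.indgree nxt (lgetI st.indgree nxt - 1)⟩ rest := by
          rw [appendOrd]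
          simp only [if_neg hguard]
        rw [heq]
        have hHold1 : HoldA n' ⟨st.q, st.visited, lsetI st.indgree nxt (lgetI st.indgree nxt - 1)⟩ := by
          intro c hc h2
          exact absurd (hall c hc) (by unfold VisS; simp at h2 ⊢; omega)
        have := ihl ⟨st.q, st.visited, lsetI st.indgree nxt (lgetI st.indgree nxt - 1)⟩ P hInv1 hHold1
          (by simpa using hf) (fun x hx => hrng x (List.mem_cons_of_mem _ hx))
        obtain ⟨c1, c2, c3, c4, c5⟩ := this
        exact ⟨c1, c2, monoA_trans (monoA_same rfl rfl) c3, by simpa using c4, by simpa using c5⟩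
  | succ f ihf =>
    have hA : ∀ st P tar, InvC n' pth ord st P → HoldE n' st (pvIdx n' tar) →
        ucA n' st.visited ≤ f + 1 → pvIdx n' tar < n' → ¬ VisS st.visited (pvIdx n' tar) →
        (pvIdx n' tar = 0 ∨ ∃ d, Nbr n' pth (pvIdx n' tar) d ∧ VisS st.visited d) →
        PredCnt n' ord st.visited (pvIdx n' tar) = 0 →
        InvC n' pth ord (appendA orders (f+1) st tar) P ∧ HoldA n' (appendA orders (f+1) st tar) ∧
          MonoA n' st (appendA orders (f+1) st tar) ∧
          VisS (appendA orders (f+1) st tar).visited (pvIdx n' tar) ∧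
          (appendA orders (f+1) st tar).q.length + ucA n' (appendA orders (f+1) st tar).visited =
            st.q.length + ucA n' st.visited ∧
          ucA n' (appendA orders (f+1) st tar).visited < ucA n' st.visited := by
      intro st P tar hInv hHoldE hf hγ hnv hleft hpc
      obtain ⟨m1, m2, m3, m4, m5⟩ := mark_step hOrd hInv hγ hnv hleft hpc
      have heq : appendA orders (f+1) st tar =
          appendOrd orders f ⟨st.q ++ [tar], lsetI st.visited tar 1, st.indgree⟩
            (orders.getD (pvIdx n' tar) []) := by
        rw [appendA]
        unfold lgetL
        rw [hOrd.1]
      rw [heq]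
      have hHold1 : HoldA n' ⟨st.q ++ [tar], lsetI st.visited tar 1, st.indgree⟩ := by
        intro c hc h2
        simp only at h2
        rw [m5 c] at h2
        by_cases h : c = pvIdx n' tar
        · simp [h] at h2
        · rw [if_neg h] at h2
          exact hHoldE c hc h h2
      have := (ihf.2) (orders.getD (pvIdx n' tar) [])
        ⟨st.q ++ [tar], lsetI st.visited tar 1, st.indgree⟩ P m1 hHold1
        (by simp only; omega) (hOrd.2.2 _ hγ)
      obtain ⟨c1, c2, c3, c4, c5⟩ := this
      refine ⟨c1, c2, monoA_trans m2 c3, c3.2.1 _ m3, ?_, ?_⟩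
      · simp only at c4 ⊢
        rw [c4]
        simp only [List.length_append, List.length_cons, List.length_nil]
        omega
      · simp only at c5 ⊢
        omega
    constructor
    · exact hA
    · intro l
      induction l with
      | nil =>
        intro st P hInv hHold _ _
        have heq : appendOrd orders (f+1) st [] = st := by rw [appendOrd]
        rw [heq]
        exact ⟨by simpa using hInv, hHold, monoA_rfl n' st, rfl, le_rfl⟩
      | cons nxt rest ihl =>
        intro st P hInv hHold hf hrng
        have hδ : pvIdx n' nxt < n' := hrng nxt List.mem_cons_self
        have hInv' : InvC n' pth ord st (P ++ pvIdx n' nxt :: rest.map (fun x => pvIdx n' x)) := by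
          simpa using hInv
        obtain ⟨hInv1, hd1, hd2⟩ := dec_step hδ hInv'
        by_cases hguard : lgetI (lsetI st.indgree nxt (lgetI st.indgree nxt - 1)) nxt = 0 ∧
            lgetI st.visited nxt = 2
        · -- the cascade: indegree hit zero on a HOLD cell, append it
          have hvis2 : st.visited.getD (pvIdx n' nxt) 0 = 2 := by
            have h2 := hguard.2
            rwa [lgetI_norm hInv.lenV] at h2
          have hind0 : (lsetI st.indgree nxt (lgetI st.indgree nxt - 1)).getD (pvIdx n' nxt) 0 = 0 := by
            have h1 := hguard.1
            rwa [lgetI_norm (by rw [length_lsetI, hInv.lenI])] at h1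
          have hnv : ¬ VisS st.visited (pvIdx n' nxt) := by unfold VisS; omega
          have hpc : PredCnt n' ord st.visited (pvIdx n' nxt) = 0 := by
            have := hInv1.ideg _ hδ
            simp only at this
            rw [hind0] at this
            have hc1 : (0:Int) ≤ (PredCnt n' ord st.visited (pvIdx n' nxt) : Int) := by positivity
            omega
          have hleft : pvIdx n' nxt = 0 ∨ ∃ d, Nbr n' pth (pvIdx n' nxt) d ∧ VisS st.visited d :=
            Or.inr (hInv.holdJ _ hδ hvis2)
          have hHoldE1 : HoldE n' ⟨st.q, st.visited, lsetI st.indgree nxt (lgetI st.indgree nxt - 1)⟩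
              (pvIdx n' nxt) := by
            intro c hc hne h2
            simp only at h2 ⊢
            rw [hd2 c hne]
            exact hHold c hc h2
          have hcall := hA ⟨st.q, st.visited, lsetI st.indgree nxt (lgetI st.indgree nxt - 1)⟩
            (P ++ rest.map (fun x => pvIdx n' x)) nxt hInv1 hHoldE1 (by simpa using hf) hδ
            (by simpa using hnv) hleft (by simpa using hpc)
          obtain ⟨c1, c2, c3, c4, c5, c6⟩ := hcall
          have heq : appendOrd orders (f+1) st (nxt :: rest) =
              appendOrd orders (f+1)
                (appendA orders (f+1) ⟨st.q, st.visited, lsetI st.indgree nxt (lgetI st.indgree nxt - 1)⟩ nxt)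
                rest := by
            rw [appendOrd]
            simp only [if_pos hguard]
          rw [heq]
          have := ihl (appendA orders (f+1) ⟨st.q, st.visited, lsetI st.indgree nxt (lgetI st.indgree nxt - 1)⟩ nxt)
            P c1 c2 (by simp only at c6 ⊢; omega) (fun x hx => hrng x (List.mem_cons_of_mem _ hx))
          obtain ⟨d1, d2, d3, d4, d5⟩ := this
          refine ⟨d1, d2, monoA_trans (monoA_same rfl rfl) (monoA_trans c3 d3), ?_, ?_⟩
          · simp only at c5 d4 ⊢
            omega
          · simp only at c6 d5 ⊢
            omega
        · -- indegree still positive (or the cell is not on HOLD): just continue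
          have heq : appendOrd orders (f+1) st (nxt :: rest) =
              appendOrd orders (f+1) ⟨st.q, st.visited, lsetI st.indgree nxt (lgetI st.indgree nxt - 1)⟩ rest := by
            rw [appendOrd]
            simp only [if_neg hguard]
          rw [heq]
          have hHold1 : HoldA n' ⟨st.q, st.visited, lsetI st.indgree nxt (lgetI st.indgree nxt - 1)⟩ := by
            intro c hc h2
            simp only at h2 ⊢
            by_cases h : c = pvIdx n' nxt
            · subst h
              intro h0
              apply hguard
              constructor
              · rw [lgetI_norm (by rw [length_lsetI, hInv.lenI])]
                exact h0
              · rw [lgetI_norm hInv.lenV]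
                exact h2
            · rw [hd2 c h]
              exact hHold c hc h2
          have := ihl ⟨st.q, st.visited, lsetI st.indgree nxt (lgetI st.indgree nxt - 1)⟩ P hInv1 hHold1
            (by simpa using hf) (fun x hx => hrng x (List.mem_cons_of_mem _ hx))
          obtain ⟨d1, d2, d3, d4, d5⟩ := this
          exact ⟨d1, d2, monoA_trans (monoA_same rfl rfl) d3, by simpa using d4, by simpa using d5⟩

-- ---- the while loop ----
def AdjOK (n' : Nat) (pth : List (Int × Int)) (edges : List (List Int)) : Prop :=
  edges.length = n' ∧ (∀ c, c < n' → ∀ x ∈ edges.getD c [], pvIdx n' x < n') ∧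
  (∀ c, c < n' → ∀ d, (∃ x ∈ edges.getD c [], pvIdx n' x = d) ↔ Nbr n' pth c d)

def ProcA (n' : Nat) (pth : List (Int × Int)) (st : AState) : Prop :=
  ∀ c, VisS st.visited c →
    (∃ v ∈ st.q, pvIdx n' v = c) ∨ (∀ d, Nbr n' pth c d → VisH st.visited d)

def ProcX (n' : Nat) (pth : List (Int × Int)) (st : AState) (c0 : Nat) (l : List Int) : Prop :=
  ∀ c, VisS st.visited c →
    (∃ v ∈ st.q, pvIdx n' v = c) ∨ (∀ d, Nbr n' pth c d → VisH st.visited d) ∨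
    (c = c0 ∧ ∀ d, Nbr n' pth c d → VisH st.visited d ∨ ∃ x ∈ l, pvIdx n' x = d)

theorem procX_mono {n' : Nat} {pth : List (Int × Int)} {st st' : AState} {c0 : Nat} {l : List Int}
    (hm : MonoA n' st st') (hp : ProcX n' pth st c0 l) : ProcX n' pth st' c0 l := by
  obtain ⟨⟨t, hq⟩, hv, hh, hn⟩ := hm
  intro c hvis'
  by_cases hold : VisS st.visited c
  · rcases hp c hold with ⟨v, hvq, he⟩ | h | ⟨rfl, h⟩
    · exact Or.inl ⟨v, by rw [hq]; exact List.mem_append_left _ hvq, he⟩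
    · exact Or.inr (Or.inl (fun d hd => hh d (h d hd)))
    · exact Or.inr (Or.inr ⟨rfl, fun d hd => (h d hd).elim (fun h => Or.inl (hh d h)) Or.inr⟩)
  · exact Or.inl (hn c hold hvis')

theorem procX_shrink {n' : Nat} {pth : List (Int × Int)} {st : AState} {c0 : Nat}
    {nxt : Int} {rest : List Int} (hp : ProcX n' pth st c0 (nxt :: rest))
    (hh : VisH st.visited (pvIdx n' nxt)) : ProcX n' pth st c0 rest := by
  intro c hvis
  rcases hp c hvis with h | h | ⟨rfl, h⟩
  · exact Or.inl h
  · exact Or.inr (Or.inl h)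
  · refine Or.inr (Or.inr ⟨rfl, fun d hd => ?_⟩)
    rcases h d hd with h | ⟨x, hx, he⟩
    · exact Or.inl h
    · rcases List.mem_cons.mp hx with rfl | hx
      · exact Or.inl (he ▸ hh)
      · exact Or.inr ⟨x, hx, he⟩

theorem edgeLoop_main (n' : Nat) (pth ord : List (Int × Int)) (orders : List (List Int))
    (hOrd : OrdOK n' ord orders) (F : Nat) (hF : n' ≤ F) (c0 : Nat) :
    ∀ l st, InvC n' pth ord st [] → HoldA n' st → ProcX n' pth st c0 l →
      VisS st.visited c0 → (∀ x ∈ l, pvIdx n' x < n' ∧ Nbr n' pth c0 (pvIdx n' x)) →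
      InvC n' pth ord (edgeLoopA orders F st l) [] ∧ HoldA n' (edgeLoopA orders F st l) ∧
        ProcX n' pth (edgeLoopA orders F st l) c0 [] ∧ MonoA n' st (edgeLoopA orders F st l) ∧
        (edgeLoopA orders F st l).q.length + ucA n' (edgeLoopA orders F st l).visited =
          st.q.length + ucA n' st.visited := by
  intro l
  induction l with
  | nil =>
    intro st hInv hHold hProc _ _
    have heq : edgeLoopA orders F st [] = st := by rw [edgeLoopA]
    rw [heq]
    exact ⟨hInv, hHold, hProc, monoA_rfl n' st, rfl⟩
  | cons nxt rest ih =>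
    intro st hInv hHold hProc hc0 hrng
    obtain ⟨hδ, hnbr⟩ := hrng nxt List.mem_cons_self
    by_cases hvis : lgetI st.visited nxt ≠ 1
    · have hnv : ¬ VisS st.visited (pvIdx n' nxt) := by
        rw [lgetI_norm hInv.lenV] at hvis
        exact hvis
      by_cases hind : lgetI st.indgree nxt = 0
      · -- append the neighbour
        have heq : edgeLoopA orders F st (nxt :: rest) =
            edgeLoopA orders F (appendA orders F st nxt) rest := by
          rw [edgeLoopA]
          simp only [if_pos hvis, if_pos hind]
        rw [heq]
        have hpc : PredCnt n' ord st.visited (pvIdx n' nxt) = 0 := by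
          rw [lgetI_norm hInv.lenI] at hind
          have := hInv.ideg _ hδ
          rw [hind] at this
          simp at this
          have h2 : (0:Int) ≤ (PredCnt n' ord st.visited (pvIdx n' nxt) : Int) := by positivity
          omega
        have hcall := (append_main n' pth ord orders hOrd F).1 st [] nxt hInv
          (fun c hc _ h2 => hHold c hc h2) (le_trans (ucA_le n' st.visited) hF) hδ hnv
          (Or.inr ⟨c0, nbr_symm hnbr, hc0⟩) hpc
        obtain ⟨c1, c2, c3, c4, c5, _⟩ := hcall
        have hProc2 : ProcX n' pth (appendA orders F st nxt) c0 rest :=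
          procX_shrink (procX_mono c3 hProc) (Or.inl c4)
        have := ih (appendA orders F st nxt) c1 c2 hProc2 (c3.2.1 _ hc0)
          (fun x hx => hrng x (List.mem_cons_of_mem _ hx))
        obtain ⟨d1, d2, d3, d4, d5⟩ := this
        exact ⟨d1, d2, d3, monoA_trans c3 d4, by omega⟩
      · -- put the neighbour on HOLD
        have heq : edgeLoopA orders F st (nxt :: rest) =
            edgeLoopA orders F ⟨st.q, lsetI st.visited nxt 2, st.indgree⟩ rest := by
          rw [edgeLoopA]
          simp only [if_pos hvis, if_neg hind]
        rw [heq]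
        set δ := pvIdx n' nxt with hδdef
        have e1 : lsetI st.visited nxt 2 = st.visited.set δ 2 := by
          unfold lsetI; rw [hInv.lenV]
        have hδlen : δ < st.visited.length := by rw [hInv.lenV]; exact hδ
        have f2 : ∀ c, (st.visited.set δ 2).getD c 0 =
            if c = δ then 2 else st.visited.getD c 0 := by
          intro c
          by_cases h : c = δ
          · subst h; rw [getD_set_self _ _ _ _ hδlen]; simp
          · rw [getD_set_ne _ _ _ (fun hh => h hh.symm)]; simp [h]
        have hδ1 : st.visited.getD δ 0 ≠ 1 := hnv
        have fS : ∀ c, VisS (st.visited.set δ 2) c ↔ VisS st.visited c := by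
          intro c
          unfold VisS
          rw [f2 c]
          by_cases h : c = δ
          · subst h; constructor <;> intro hh <;> omega
          · simp [h]
        have fH : ∀ c, VisH (st.visited.set δ 2) c ↔ (c = δ ∨ VisH st.visited c) := by
          intro c
          unfold VisH
          rw [f2 c]
          by_cases h : c = δ
          · simp [h]
          · simp [h]
        have hst' : InvC n' pth ord ⟨st.q, lsetI st.visited nxt 2, st.indgree⟩ [] := by
          refine ⟨by simp [e1, hInv.lenV], hInv.lenI, ?_, ?_, ?_, ?_⟩
          · intro c hc
            rw [hInv.ideg c hc]
            simp only [e1]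
            congr 2
            unfold PredCnt
            apply List.countP_congr
            intro p _
            rw [f2 (pvIdx n' p.1)]
            by_cases h : pvIdx n' p.1 = δ
            · rw [if_pos h, h]
              have h1 : (st.visited.getD δ 0 == 1) = false := by simpa using hδ1
              rw [h1]
              simp
            · rw [if_neg h]
          · intro c hc h2
            simp only [e1] at h2 ⊢
            rw [f2 c] at h2
            by_cases h : c = δ
            · subst h
              exact ⟨c0, nbr_symm hnbr, (fS c0).mpr hc0⟩
            · rw [if_neg h] at h2
              obtain ⟨d, hd, hvd⟩ := hInv.holdJ c hc h2
              exact ⟨d, hd, (fS d).mpr hvd⟩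
          · intro v hv
            obtain ⟨h1, h2⟩ := hInv.qok v hv
            exact ⟨h1, by simp only [e1]; exact (fS _).mpr h2⟩
          · obtain ⟨gl, hnd, hiff, hbd, hj⟩ := hInv.gen
            exact ⟨gl, hnd, (fun c => by simp only [e1]; rw [fS c]; exact hiff c), hbd, hj⟩
        have hHold' : HoldA n' ⟨st.q, lsetI st.visited nxt 2, st.indgree⟩ := by
          intro c hc h2
          simp only [e1] at h2 ⊢
          rw [f2 c] at h2
          by_cases h : c = δ
          · subst h
            intro h0
            apply hind
            rw [lgetI_norm hInv.lenI]
            exact h0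
          · rw [if_neg h] at h2
            exact hHold c hc h2
        have hMono' : MonoA n' st ⟨st.q, lsetI st.visited nxt 2, st.indgree⟩ := by
          refine ⟨⟨[], by simp⟩, ?_, ?_, ?_⟩
          · intro c h; simp only [e1]; exact (fS c).mpr h
          · intro c h; simp only [e1]; exact (fH c).mpr (Or.inr h)
          · intro c h h'
            simp only [e1] at h'
            exact absurd ((fS c).mp h') h
        have hProc' : ProcX n' pth ⟨st.q, lsetI st.visited nxt 2, st.indgree⟩ c0 rest := by
          apply procX_shrink (procX_mono hMono' hProc)
          simp only [e1]
          exact (fH δ).mpr (Or.inl rfl)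
        have huc : ucA n' (lsetI st.visited nxt 2) = ucA n' st.visited := by
          simp only [e1]
          unfold ucA
          apply List.countP_congr
          intro c _
          rw [f2 c]
          by_cases h : c = δ
          · subst h
            have h1 : (st.visited.getD δ 0 == 1) = false := by simpa using hδ1
            rw [if_pos rfl, h1]
            simp
          · rw [if_neg h]
        have := ih ⟨st.q, lsetI st.visited nxt 2, st.indgree⟩ hst' hHold' hProc'
          (by simp only [e1]; exact (fS c0).mpr hc0) (fun x hx => hrng x (List.mem_cons_of_mem _ hx))
        obtain ⟨d1, d2, d3, d4, d5⟩ := this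
        refine ⟨d1, d2, d3, monoA_trans hMono' d4, ?_⟩
        simp only at d5
        rw [huc] at d5
        simpa using d5
    · -- already visited: skip
      have heq : edgeLoopA orders F st (nxt :: rest) = edgeLoopA orders F st rest := by
        rw [edgeLoopA]
        simp only [if_neg hvis]
      rw [heq]
      have hv : VisS st.visited (pvIdx n' nxt) := by
        simp only [not_not] at hvis
        rw [lgetI_norm hInv.lenV] at hvis
        exact hvis
      exact ih st hInv hHold (procX_shrink hProc (Or.inl hv)) hc0
        (fun x hx => hrng x (List.mem_cons_of_mem _ hx))

theorem while_main (n' : Nat) (pth ord : List (Int × Int)) (edges orders : List (List Int))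
    (hAdj : AdjOK n' pth edges) (hOrd : OrdOK n' ord orders) (F : Nat) (hF : n' ≤ F) :
    ∀ fuel st, InvC n' pth ord st [] → HoldA n' st → ProcA n' pth st →
      st.q.length + ucA n' st.visited ≤ fuel →
      InvC n' pth ord (whileA edges orders F fuel st) [] ∧
        HoldA n' (whileA edges orders F fuel st) ∧
        ProcA n' pth (whileA edges orders F fuel st) ∧
        (whileA edges orders F fuel st).q = [] ∧
        (∀ c, VisS st.visited c → VisS (whileA edges orders F fuel st).visited c) := by
  intro fuel
  induction fuel with
  | zero =>
    intro st hInv hHold hProc hm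
    have hq : st.q = [] := List.eq_nil_of_length_eq_zero (by omega)
    have heq : whileA edges orders F 0 st = st := by rw [whileA]
    rw [heq]
    exact ⟨hInv, hHold, hProc, hq, fun _ h => h⟩
  | succ fuel ih =>
    intro st hInv hHold hProc hm
    cases hq : st.q with
    | nil =>
      have heq : whileA edges orders F (fuel+1) st = st := by
        rw [whileA, hq]
      rw [heq]
      exact ⟨hInv, hHold, hProc, hq, fun _ h => h⟩
    | cons cur rest =>
      obtain ⟨hc0, hc0v⟩ := hInv.qok cur (by rw [hq]; exact List.mem_cons_self)
      have heq : whileA edges orders F (fuel+1) st =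
          whileA edges orders F fuel
            (edgeLoopA orders F ⟨rest, st.visited, st.indgree⟩ (lgetL edges cur)) := by
        rw [whileA, hq]
      rw [heq]
      have hgetl : lgetL edges cur = edges.getD (pvIdx n' cur) [] := by
        unfold lgetL; rw [hAdj.1]
      have hInvP : InvC n' pth ord ⟨rest, st.visited, st.indgree⟩ [] :=
        ⟨hInv.lenV, hInv.lenI, hInv.ideg, hInv.holdJ,
          fun v hv => hInv.qok v (by rw [hq]; exact List.mem_cons_of_mem _ hv), hInv.gen⟩
      have hProcP : ProcX n' pth ⟨rest, st.visited, st.indgree⟩ (pvIdx n' cur)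
          (edges.getD (pvIdx n' cur) []) := by
        intro c hvis
        rcases hProc c hvis with ⟨v, hvq, he⟩ | h
        · rw [hq] at hvq
          rcases List.mem_cons.mp hvq with rfl | hvq2
          · subst he
            exact Or.inr (Or.inr ⟨rfl, fun d hd => Or.inr ((hAdj.2.2 _ hc0 d).mpr hd)⟩)
          · exact Or.inl ⟨v, hvq2, he⟩
        · exact Or.inr (Or.inl h)
      have hrng : ∀ x ∈ edges.getD (pvIdx n' cur) [], pvIdx n' x < n' ∧
          Nbr n' pth (pvIdx n' cur) (pvIdx n' x) := by
        intro x hx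
        exact ⟨hAdj.2.1 _ hc0 x hx, (hAdj.2.2 _ hc0 _).mp ⟨x, hx, rfl⟩⟩
      rw [hgetl]
      obtain ⟨d1, d2, d3, d4, d5⟩ := edgeLoop_main n' pth ord orders hOrd F hF (pvIdx n' cur)
        (edges.getD (pvIdx n' cur) []) ⟨rest, st.visited, st.indgree⟩ hInvP hHold hProcP hc0v hrng
      have hProcA : ProcA n' pth (edgeLoopA orders F ⟨rest, st.visited, st.indgree⟩
          (edges.getD (pvIdx n' cur) [])) := by
        intro c hvis
        rcases d3 c hvis with h | h | ⟨rfl, h⟩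
        · exact Or.inl h
        · exact Or.inr h
        · refine Or.inr (fun d hd => ?_)
          rcases h d hd with h | ⟨x, hx, _⟩
          · exact h
          · cases hx
      have hm2 : (edgeLoopA orders F ⟨rest, st.visited, st.indgree⟩
          (edges.getD (pvIdx n' cur) [])).q.length +
          ucA n' (edgeLoopA orders F ⟨rest, st.visited, st.indgree⟩
            (edges.getD (pvIdx n' cur) [])).visited ≤ fuel := by
        rw [d5]
        simp only
        rw [hq] at hm
        simp at hm
        omega
      obtain ⟨e1, e2, e3, e4, e5⟩ := ih _ d1 d2 hProcA hm2
      exact ⟨e1, e2, e3, e4, fun c h => e5 c (d4.2.1 c h)⟩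

-- at termination the opened set is closed under FS
theorem closedA {n' : Nat} {pth ord : List (Int × Int)} {st : AState}
    (hInv : InvC n' pth ord st []) (hHold : HoldA n' st) (hProc : ProcA n' pth st)
    (hq : st.q = []) (h0 : VisS st.visited 0) : ClosedSet n' pth ord (VisS st.visited) := by
  intro c hc hfs
  by_contra hnv
  have hpc : PredCnt n' ord st.visited c = 0 := by
    apply List.countP_eq_zero.mpr
    intro p hp
    by_cases h : pvIdx n' p.2 = c
    · have := hfs.2 p hp h
      unfold VisS at this
      rw [this]
      simp [h]
    · simp [h]
  have hind : st.indgree.getD c 0 = 0 := by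
    rw [hInv.ideg c hc, hpc]
    simp
  have hnh : ¬ VisH st.visited c := by
    rintro (h | h)
    · exact hnv h
    · exact hHold c hc h hind
  rcases hfs.1 with rfl | ⟨d, hd, hvd⟩
  · exact hnv h0
  · rcases hProc d hvd with ⟨v, hvq, _⟩ | h
    · rw [hq] at hvq
      cases hvq
    · exact hnh (h c (nbr_symm hd))

-- ---- assembling A ----
theorem pvIdx_zero (n' : Nat) : pvIdx n' 0 = 0 := by unfold pvIdx; simp

theorem getD_rep {α : Type} (a : α) (n i : Nat) : (List.replicate n a).getD i a = a := by
  rw [List.getD_eq_getElem?_getD, List.getElem?_replicate]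
  by_cases h : i < n <;> simp [h]

theorem visS_rep (n' : Nat) (c : Nat) : ¬ VisS (List.replicate n' (0:Int)) c := by
  unfold VisS
  rw [getD_rep]
  omega

theorem runA_core (n' : Nat) (pth ord : List (Int × Int)) (edges orders : List (List Int))
    (ig : List Int) (hAdj : AdjOK n' pth edges) (hOrd : OrdOK n' ord orders)
    (hlenI : ig.length = n')
    (hig : ∀ c, c < n' → ig.getD c 0 = (ord.countP (fun p => pvIdx n' p.2 == c) : Int))
    (hn' : 0 < n') :
    GenSet n' pth ord (VisS (whileA edges orders (n'+1) (n'+2)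
        (if lgetI ig 0 = 0 then appendA orders (n'+1) ⟨[], List.replicate n' 0, ig⟩ 0
         else ⟨[], List.replicate n' 0, ig⟩)).visited) ∧
    ClosedSet n' pth ord (VisS (whileA edges orders (n'+1) (n'+2)
        (if lgetI ig 0 = 0 then appendA orders (n'+1) ⟨[], List.replicate n' 0, ig⟩ 0
         else ⟨[], List.replicate n' 0, ig⟩)).visited) := by
  have hInv0 : InvC n' pth ord ⟨[], List.replicate n' 0, ig⟩ [] := by
    refine ⟨by simp, hlenI, ?_, ?_, by simp, ⟨[], List.nodup_nil, ?_, by simp, by intro i h; simp at h⟩⟩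
    · intro c hc
      rw [hig c hc]
      simp only
      have : PredCnt n' ord (List.replicate n' 0) c = ord.countP (fun p => pvIdx n' p.2 == c) := by
        unfold PredCnt
        apply List.countP_congr
        intro p _
        rw [getD_rep]
        simp
      rw [this]
      simp
    · intro c hc h2
      simp only at h2
      rw [getD_rep] at h2
      omega
    · intro c
      simp only
      constructor
      · intro h
        exact absurd h (visS_rep n' c)
      · intro h
        cases h
  have hHold0 : HoldA n' ⟨[], List.replicate n' 0, ig⟩ := by
    intro c hc h2
    simp only at h2
    rw [getD_rep] at h2
    omega
  have hProc0 : ProcA n' pth ⟨[], List.replicate n' 0, ig⟩ := by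
    intro c h
    exact absurd h (visS_rep n' c)
  by_cases hig0 : lgetI ig 0 = 0
  · rw [if_pos hig0]
    have hpc : PredCnt n' ord (List.replicate n' (0:Int)) (pvIdx n' (0:Int)) = 0 := by
      rw [lgetI_norm hlenI] at hig0
      rw [pvIdx_zero] at hig0 ⊢
      rw [hig 0 hn'] at hig0
      have : PredCnt n' ord (List.replicate n' 0) 0 = ord.countP (fun p => pvIdx n' p.2 == 0) := by
        unfold PredCnt
        apply List.countP_congr
        intro p _
        rw [getD_rep]
        simp
      omega
    have hcall := (append_main n' pth ord orders hOrd (n'+1)).1 ⟨[], List.replicate n' 0, ig⟩ [] 0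
      hInv0 (fun c hc _ h2 => hHold0 c hc h2) (le_trans (ucA_le n' _) (by omega))
      (by rw [pvIdx_zero]; exact hn') (by rw [pvIdx_zero]; exact visS_rep n' 0)
      (Or.inl (pvIdx_zero n')) hpc
    obtain ⟨c1, c2, c3, c4, c5, _⟩ := hcall
    have hProc1 : ProcA n' pth (appendA orders (n'+1) ⟨[], List.replicate n' 0, ig⟩ 0) := by
      intro c hvis
      exact Or.inl (c3.2.2.2 c (visS_rep n' c) hvis)
    have hm : (appendA orders (n'+1) ⟨[], List.replicate n' 0, ig⟩ 0).q.length +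
        ucA n' (appendA orders (n'+1) ⟨[], List.replicate n' 0, ig⟩ 0).visited ≤ n' + 2 := by
      rw [c5]
      simp only [List.length_nil]
      have := ucA_le n' (List.replicate n' (0:Int))
      omega
    obtain ⟨e1, e2, e3, e4, e5⟩ := while_main n' pth ord edges orders hAdj hOrd (n'+1)
      (by omega) (n'+2) _ c1 c2 hProc1 hm
    refine ⟨e1.gen, closedA e1 e2 e3 e4 ?_⟩
    apply e5
    rw [← pvIdx_zero n']
    exact c4
  · rw [if_neg hig0]
    have heq : whileA edges orders (n'+1) (n'+2) ⟨[], List.replicate n' 0, ig⟩ =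
        ⟨[], List.replicate n' 0, ig⟩ := by
      rw [show n'+2 = (n'+1)+1 from rfl, whileA]
    rw [heq]
    constructor
    · exact hInv0.gen
    · intro c hc hfs
      exfalso
      rcases hfs.1 with rfl | ⟨d, _, hvd⟩
      · apply hig0
        rw [lgetI_norm hlenI, pvIdx_zero, hig 0 hn']
        have : ord.countP (fun p => pvIdx n' p.2 == 0) = 0 := by
          apply List.countP_eq_zero.mpr
          intro p hp hb
          exact absurd (hfs.2 p hp (by simpa using hb)) (visS_rep n' _)
        rw [this]
        rfl
      · exact absurd hvd (visS_rep n' d)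

-- ---- B-side ----
def CntT (vis : List Bool) : Nat := vis.countP (fun b => b)

def InvBB (n' : Nat) (pth ord : List (Int × Int)) (vis : List Bool) : Prop :=
  vis.length = n' ∧ GenSet n' pth ord (VisB vis)

def PredOK (n' : Nat) (ord : List (Int × Int)) (preds : List (List Int)) : Prop :=
  preds.length = n' ∧
  (∀ c, c < n' → ∀ x, (x ∈ preds.getD c [] ↔ ∃ p ∈ ord, pvIdx n' p.2 = c ∧ x = p.1))

theorem lgetB_norm {n' : Nat} {xs : List Bool} (h : xs.length = n') (i : Int) :
    lgetB xs i = xs.getD (pvIdx n' i) false := by unfold lgetB; rw [h]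

theorem cntT_set : ∀ (l : List Bool) (i : Nat), i < l.length → l.getD i false = false →
    CntT (l.set i true) = CntT l + 1 := by
  intro l
  induction l with
  | nil => intro i h _; simp at h
  | cons a t ih =>
    intro i hi hd
    cases i with
    | zero =>
      have ha : a = false := hd
      subst ha
      simp [CntT, List.countP_cons]
    | succ j =>
      have hj : j < t.length := by simpa using hi
      have hd' : t.getD j false = false := hd
      simp only [List.set, CntT, List.countP_cons]
      have := ih j hj hd'
      unfold CntT at this
      omega

theorem cntT_mono : ∀ (x y : List Bool), x.length = y.length →
    (∀ i, x.getD i false = true → y.getD i false = true) → CntT x ≤ CntT y := by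
  intro x
  induction x with
  | nil => intro y _ _; simp [CntT]
  | cons a xs ih =>
    intro y hlen hp
    cases y with
    | nil => simp at hlen
    | cons b ys =>
      have h0 : a = true → b = true := hp 0
      have htl : CntT xs ≤ CntT ys :=
        ih ys (by simpa using hlen) (fun i => hp (i+1))
      unfold CntT at htl ⊢
      simp only [List.countP_cons]
      cases a with
      | false => cases b <;> simp <;> omega
      | true => rw [h0 rfl]; simp; omega

theorem cntT_le {n' : Nat} {x : List Bool} (h : x.length = n') : CntT x ≤ n' := by
  have := List.countP_le_length (p := fun b => b) (l := x)
  unfold CntT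
  omega

theorem condB_iff {n' : Nat} {pth ord : List (Int × Int)} {adj preds : List (List Int)}
    (hAdj : AdjOK n' pth adj) (hPred : PredOK n' ord preds) {vis : List Bool}
    (hlen : vis.length = n') {v : Nat} (hv : v < n') :
    (((v = 0 ∨ (adj.getD v []).any (fun w => lgetB vis w)) ∧
      (preds.getD v []).all (fun u => lgetB vis u)) ↔ FS n' pth ord (VisB vis) v) := by
  constructor
  · rintro ⟨hl, hr⟩
    constructor
    · rcases hl with rfl | hl
      · exact Or.inl rfl
      · obtain ⟨w, hw, hb⟩ := List.any_eq_true.mp hl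
        refine Or.inr ⟨pvIdx n' w, (hAdj.2.2 v hv _).mp ⟨w, hw, rfl⟩, ?_⟩
        rw [lgetB_norm hlen] at hb
        exact hb
    · intro p hp hc
      have hx : p.1 ∈ preds.getD v [] := (hPred.2 v hv p.1).mpr ⟨p, hp, hc, rfl⟩
      have := List.all_eq_true.mp hr p.1 hx
      rw [lgetB_norm hlen] at this
      exact this
  · rintro ⟨hl, hr⟩
    constructor
    · rcases hl with rfl | ⟨d, hd, hvd⟩
      · exact Or.inl rfl
      · refine Or.inr (List.any_eq_true.mpr ?_)
        obtain ⟨x, hx, hxd⟩ := (hAdj.2.2 v hv d).mpr hd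
        refine ⟨x, hx, ?_⟩
        rw [lgetB_norm hlen, hxd]
        exact hvd
    · apply List.all_eq_true.mpr
      intro u hu
      obtain ⟨p, hp, hc, rfl⟩ := (hPred.2 v hv u).mp hu
      rw [lgetB_norm hlen]
      exact hr p hp hc

theorem passB_main {n' : Nat} {pth ord : List (Int × Int)} {adj preds : List (List Int)}
    (hAdj : AdjOK n' pth adj) (hPred : PredOK n' ord preds) :
    ∀ (r : List Nat) (vis : List Bool) (ch : Bool), InvBB n' pth ord vis → (∀ v ∈ r, v < n') →
      InvBB n' pth ord (passB adj preds (vis, ch) r).1 ∧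
      (∀ c, VisB vis c → VisB (passB adj preds (vis, ch) r).1 c) ∧
      ((passB adj preds (vis, ch) r).2 = false →
        (passB adj preds (vis, ch) r).1 = vis ∧
          (∀ v ∈ r, FS n' pth ord (VisB vis) v → VisB vis v)) ∧
      (ch = true → (passB adj preds (vis, ch) r).2 = true) ∧
      (ch = false → (passB adj preds (vis, ch) r).2 = true →
        CntT vis < CntT (passB adj preds (vis, ch) r).1) := by
  intro r
  induction r with
  | nil =>
    intro vis ch hInv _
    have heq : passB adj preds (vis, ch) [] = (vis, ch) := by rw [passB]
    rw [heq]
    exact ⟨hInv, fun _ h => h, fun h => ⟨rfl, by simp⟩, fun h => h, fun h h' => by rw [h] at h'; cases h'⟩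
  | cons v rest ihr =>
    intro vis ch hInv hrng
    have hv : v < n' := hrng v List.mem_cons_self
    have hvlen : v < vis.length := by rw [hInv.1]; exact hv
    by_cases hcond : vis.getD v false = false ∧
        (v = 0 ∨ (adj.getD v []).any (fun w => lgetB vis w)) ∧
        (preds.getD v []).all (fun u => lgetB vis u)
    · have heq : passB adj preds (vis, ch) (v :: rest) =
          passB adj preds (vis.set v true, true) rest := by
        rw [passB]
        simp only [if_pos hcond]
      rw [heq]
      have hfs : FS n' pth ord (VisB vis) v :=
        (condB_iff hAdj hPred hInv.1 hv).mp hcond.2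
      have hnv : ¬ VisB vis v := by
        unfold VisB
        rw [hcond.1]
        simp
      have fBS : ∀ c, VisB (vis.set v true) c ↔ (c = v ∨ VisB vis c) := by
        intro c
        unfold VisB
        by_cases h : c = v
        · subst h
          rw [getD_set_self _ _ _ _ hvlen]
          simp
        · rw [getD_set_ne _ _ _ (fun hh => h hh.symm)]
          simp [h]
      have hInv1 : InvBB n' pth ord (vis.set v true) := by
        refine ⟨by simp [hInv.1], ?_⟩
        obtain ⟨l, hnd, hiff, hbd, hj⟩ := hInv.2
        have hvl : v ∉ l := fun h => hnv ((hiff v).mpr h)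
        refine ⟨l ++ [v], ?_, ?_, ?_, ?_⟩
        · rw [List.nodup_append]
          refine ⟨hnd, List.nodup_singleton _, ?_⟩
          intro a ha b hb
          rw [List.mem_singleton.mp hb]
          exact fun h => hvl (h ▸ ha)
        · intro c
          rw [fBS c]
          simp [hiff c]
          tauto
        · intro c hc
          rcases List.mem_append.mp hc with hc | hc
          · exact hbd c hc
          · rw [List.mem_singleton.mp hc]
            exact hv
        · exact justified_snoc hj (fs_mono (fun d hd => (hiff d).mp hd) hfs)
      have hcnt1 : CntT (vis.set v true) = CntT vis + 1 := cntT_set vis v hvlen hcond.1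
      obtain ⟨d1, d2, d3, d4, d5⟩ := ihr (vis.set v true) true hInv1
        (fun x hx => hrng x (List.mem_cons_of_mem _ hx))
      refine ⟨d1, ?_, ?_, fun _ => d4 rfl, ?_⟩
      · intro c h
        exact d2 c ((fBS c).mpr (Or.inr h))
      · intro hfalse
        rw [d4 rfl] at hfalse
        cases hfalse
      · intro _ _
        have h1 : CntT (vis.set v true) ≤ CntT (passB adj preds (vis.set v true, true) rest).1 := by
          apply cntT_mono _ _ (by rw [d1.1]; simp [hInv.1])
          intro i hi
          exact d2 i hi
        omega
    · have heq : passB adj preds (vis, ch) (v :: rest) = passB adj preds (vis, ch) rest := by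
        rw [passB]
        simp only [if_neg hcond]
      rw [heq]
      obtain ⟨d1, d2, d3, d4, d5⟩ := ihr vis ch hInv
        (fun x hx => hrng x (List.mem_cons_of_mem _ hx))
      refine ⟨d1, d2, ?_, d4, d5⟩
      intro hfalse
      obtain ⟨he, hcl⟩ := d3 hfalse
      refine ⟨he, fun u hu => ?_⟩
      rcases List.mem_cons.mp hu with rfl | hu
      · intro hfs
        by_contra hnvis
        apply hcond
        refine ⟨?_, (condB_iff hAdj hPred hInv.1 hv).mpr hfs⟩
        unfold VisB at hnvis
        cases hb : vis.getD u false
        · rfl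
        · exact absurd hb hnvis
      · exact hcl u hu

theorem satB_main {n' : Nat} {pth ord : List (Int × Int)} {adj preds : List (List Int)}
    (hAdj : AdjOK n' pth adj) (hPred : PredOK n' ord preds) :
    ∀ (f : Nat) (vis : List Bool), InvBB n' pth ord vis → n' - CntT vis < f →
      InvBB n' pth ord (satB adj preds f vis) ∧
      ClosedSet n' pth ord (VisB (satB adj preds f vis)) := by
  intro f
  induction f with
  | zero => intro vis _ hf; omega
  | succ f ih =>
    intro vis hInv hf
    have hrng : ∀ v ∈ List.range adj.length, v < n' := by
      intro v hv
      rw [List.mem_range, hAdj.1] at hv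
      exact hv
    obtain ⟨d1, d2, d3, d4, d5⟩ := passB_main hAdj hPred (List.range adj.length) vis false hInv hrng
    have heq : satB adj preds (f+1) vis =
        if (passB adj preds (vis, false) (List.range adj.length)).2
        then satB adj preds f (passB adj preds (vis, false) (List.range adj.length)).1
        else (passB adj preds (vis, false) (List.range adj.length)).1 := by
      rw [satB]
    rw [heq]
    cases hch : (passB adj preds (vis, false) (List.range adj.length)).2
    · simp only [Bool.false_eq_true, if_false]
      obtain ⟨he, hcl⟩ := d3 hch
      rw [he]
      refine ⟨hInv, ?_⟩
      intro c hc hfs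
      exact hcl c (by rw [List.mem_range, hAdj.1]; exact hc) hfs
    · simp only [if_true]
      have h5 := d5 rfl hch
      have hle : CntT (passB adj preds (vis, false) (List.range adj.length)).1 ≤ n' := cntT_le d1.1
      exact ih _ d1 (by omega)

-- ---- instantiating the build characterisations under Pre_ ----
theorem pvIdx_lt_of {n : Int} (hn : 1 ≤ n) {v : Int} (h1 : -n ≤ v) (h2 : v < n) :
    pvIdx n.toNat v < n.toNat := by
  unfold pvIdx
  split <;> omega

theorem buildAdj_ok {n : Int} (hn : 1 ≤ n) {pth : List (Int × Int)}
    (hp : ∀ p ∈ pth, -n ≤ p.1 ∧ p.1 < n ∧ -n ≤ p.2 ∧ p.2 < n) :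
    AdjOK n.toNat pth (buildAdj n.toNat pth) := by
  have hlen : (buildAdj n.toNat pth).length = n.toNat := by
    unfold buildAdj
    rw [adjFold_len]
    simp
  have hmem : ∀ c, c < n.toNat → ∀ x, (x ∈ (buildAdj n.toNat pth).getD c [] ↔
      ∃ p ∈ pth, (pvIdx n.toNat p.1 = c ∧ x = p.2) ∨ (pvIdx n.toNat p.2 = c ∧ x = p.1)) := by
    intro c hc x
    unfold buildAdj
    rw [adjFold_mem pth (List.replicate n.toNat []) (by simpa using hc) x]
    rw [getD_rep]
    simp
  refine ⟨hlen, ?_, ?_⟩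
  · intro c hc x hx
    obtain ⟨p, hpmem, hcase⟩ := (hmem c hc x).mp hx
    obtain ⟨b1, b2, b3, b4⟩ := hp p hpmem
    rcases hcase with ⟨_, rfl⟩ | ⟨_, rfl⟩
    · exact pvIdx_lt_of hn b3 b4
    · exact pvIdx_lt_of hn b1 b2
  · intro c hc d
    constructor
    · rintro ⟨x, hx, rfl⟩
      obtain ⟨p, hpmem, hcase⟩ := (hmem c hc x).mp hx
      rcases hcase with ⟨h1, rfl⟩ | ⟨h1, rfl⟩
      · exact ⟨p, hpmem, Or.inl ⟨h1, rfl⟩⟩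
      · exact ⟨p, hpmem, Or.inr ⟨h1, rfl⟩⟩
    · rintro ⟨p, hpmem, hcase⟩
      rcases hcase with ⟨h1, h2⟩ | ⟨h1, h2⟩
      · exact ⟨p.2, (hmem c hc p.2).mpr ⟨p, hpmem, Or.inl ⟨h1, rfl⟩⟩, h2⟩
      · exact ⟨p.1, (hmem c hc p.1).mpr ⟨p, hpmem, Or.inr ⟨h1, rfl⟩⟩, h2⟩

theorem buildOrd_ok {n : Int} (hn : 1 ≤ n) {ord : List (Int × Int)}
    (ho : ∀ p ∈ ord, -n ≤ p.1 ∧ p.1 < n ∧ -n ≤ p.2 ∧ p.2 < n) :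
    OrdOK n.toNat ord (buildOrd n.toNat ord).1 := by
  rw [(buildOrd_fst n.toNat ord).1]
  have hrep : (List.replicate n.toNat ([]:List Int)).length = n.toNat := by simp
  refine ⟨by rw [appFold_len]; exact hrep, ?_, ?_⟩
  · intro c hc t
    have := appFold_countP (fun p => p.1) (fun p => p.2) ord (List.replicate n.toNat [])
      (c := c) (by simpa using hc) (fun x => pvIdx n.toNat x == t)
    rw [getD_rep] at this
    rw [this, hrep]
    simp
  · intro c hc x hx
    have := appFold_mem (fun p => p.1) (fun p => p.2) ord (List.replicate n.toNat [])
      (c := c) (by simpa using hc) x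
    rw [getD_rep] at this
    rw [this] at hx
    rcases hx with h | ⟨p, hpm, _, rfl⟩
    · cases h
    · obtain ⟨_, _, b3, b4⟩ := ho p hpm
      exact pvIdx_lt_of hn b3 b4

theorem buildOrd_ig {n : Int} (hn : 1 ≤ n) (ord : List (Int × Int)) :
    (buildOrd n.toNat ord).2.length = n.toNat ∧
    (∀ c, c < n.toNat → (buildOrd n.toNat ord).2.getD c 0 =
      (ord.countP (fun p => pvIdx n.toNat p.2 == c) : Int)) := by
  rw [(buildOrd_fst n.toNat ord).2]
  constructor
  · rw [igFold_len]; simp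
  · intro c hc
    have := igFold_getD ord (List.replicate n.toNat (0:Int)) (c := c) (by simpa using hc)
    rw [this, getD_rep]
    simp

theorem buildPred_ok {n : Int} (hn : 1 ≤ n) (ord : List (Int × Int)) :
    PredOK n.toNat ord (buildPred n.toNat ord) := by
  unfold buildPred
  have hrep : (List.replicate n.toNat ([]:List Int)).length = n.toNat := by simp
  refine ⟨by rw [appFold_len]; exact hrep, ?_⟩
  intro c hc x
  have := appFold_mem (fun p => p.2) (fun p => p.1) ord (List.replicate n.toNat [])
    (c := c) (by simpa using hc) x
  rw [getD_rep] at this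
  rw [this, hrep]
  simp

theorem all_range_iff (n' : Nat) (f : Nat → Bool) :
    ((List.range n').all f = true) ↔ ∀ c, c < n' → f c = true := by
  simp [List.all_eq_true, List.mem_range]

theorem all_list_iff (l : List Bool) :
    (l.all (fun b => b) = true) ↔ ∀ c, c < l.length → l.getD c false = true := by
  rw [List.all_eq_true]
  constructor
  · intro h c hc
    rw [List.getD_eq_getElem _ _ hc]
    exact h _ (List.getElem_mem hc)
  · intro h x hx
    obtain ⟨i, hi, rfl⟩ := List.mem_iff_getElem.mp hx
    have := h i hi
    rw [List.getD_eq_getElem _ _ hi] at this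
    exact this

theorem cntT_rep (n' : Nat) : CntT (List.replicate n' false) = 0 := by
  unfold CntT
  apply List.countP_eq_zero.mpr
  intro b hb
  rw [List.eq_of_mem_replicate hb]
  simp

-- ===== VERDICT (by name: the statement is the Claim_ definition above) =====
theorem solution_spec : Claim_equal_solution := by
  intro n path order _ hpre
  obtain ⟨hn, hp, ho⟩ := hpre
  unfold Spec_solution
  have hn' : 0 < n.toNat := by omega
  have hAdj := buildAdj_ok hn hp
  have hOrd := buildOrd_ok hn ho
  have hIg := buildOrd_ig hn order
  have hPred := buildPred_ok hn order
  have hrunA : runA n path order =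
      whileA (buildAdj n.toNat path) (buildOrd n.toNat order).1 (n.toNat+1) (n.toNat+2)
        (if lgetI (buildOrd n.toNat order).2 0 = 0
         then appendA (buildOrd n.toNat order).1 (n.toNat+1)
           ⟨[], List.replicate n.toNat 0, (buildOrd n.toNat order).2⟩ 0
         else ⟨[], List.replicate n.toNat 0, (buildOrd n.toNat order).2⟩) := rfl
  have hrunB : runB n path order =
      satB (buildAdj n.toNat path) (buildPred n.toNat order) (n.toNat+1)
        (List.replicate n.toNat false) := rfl
  obtain ⟨hAgen, hAclosed⟩ := runA_core n.toNat path order _ _ _ hAdj hOrd hIg.1 hIg.2 hn'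
  have hBInv0 : InvBB n.toNat path order (List.replicate n.toNat false) := by
    refine ⟨by simp, ⟨[], List.nodup_nil, ?_, by simp, by intro i h; simp at h⟩⟩
    intro c
    unfold VisB
    rw [getD_rep]
    simp
  obtain ⟨hBInv, hBclosed⟩ := satB_main hAdj hPred (n.toNat+1) (List.replicate n.toNat false)
    hBInv0 (by rw [cntT_rep]; omega)
  rw [← hrunA] at hAgen hAclosed
  rw [← hrunB] at hBInv hBclosed
  have hiff : ∀ c, VisS (runA n path order).visited c ↔ VisB (runB n path order) c := by
    intro c
    exact ⟨gen_sub_closed hAgen hBclosed c, gen_sub_closed hBInv.2 hAclosed c⟩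
  unfold solution solution_alt
  apply Bool.eq_iff_iff.mpr
  rw [all_range_iff, all_list_iff, hBInv.1]
  constructor
  · intro h c hc
    have h1 : VisS (runA n path order).visited c := by
      have := h c hc
      unfold VisS
      simpa using this
    exact (hiff c).mp h1
  · intro h c hc
    have h2 : VisB (runB n path order) c := h c hc
    have := (hiff c).mpr h2
    unfold VisS at this
    simpa using this
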